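-- pv_equiv track=rewrite | github.com/OpenVision-Archive/persianempire-plugins | PurePrestige/src/Stools/PPrestigesatEditor/satedithd.py | getTransponders
-- ===== SOURCE A (Python) =====
-- def getTransponders(lamedb):
--     if lamedb is None:
--         return
--     else:
--         collect = False
--         state = 0
--         transponders = []
--         tp = []
--         for x in lamedb:
--             if x == 'transponders\n':
--                 collect = True
--                 continue
--             if x == 'end\n':
--                 break
--             y = x.strip().split(':')
--             if collect:
--                 if y[0] == '/':
--                     transponders.append(tp)
--                     tp = []
--                 else:
--                     tp.append(y)
--
--         return transponders
-- ===== SOURCE B (Python) =====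
-- from itertools import takewhile
--
--
-- def getTransponders(lamedb):
--     if lamedb is None:
--         return
--     # materialize once, truncated at the first 'end\n' (even before the marker)
--     lines = list(takewhile(lambda x: x != 'end\n', lamedb))
--     try:
--         i = lines.index('transponders\n')
--     except ValueError:
--         return []
--     ys = [l.strip().split(':') for l in lines[i + 1:] if l != 'transponders\n']
--     # block boundaries are the '/' fields; the trailing unterminated block is dropped
--     seps = [j for j, y in enumerate(ys) if y[0] == '/']
--     return [ys[(seps[k - 1] + 1 if k > 0 else 0):seps[k]] for k in range(len(seps))]
-- ===== Notes on version B (the rewrite author's own statement) =====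
-- stated objective: alternative
-- what changed: Replaces A's single pass with a flag and running accumulators by a pipeline decomposition: truncate at the first 'end ', locate 'transponders ' by index, filter/map the remaining lines once, then rebuild the blocks from the positions of the '/' separators by slicing.
import Mathlib
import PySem

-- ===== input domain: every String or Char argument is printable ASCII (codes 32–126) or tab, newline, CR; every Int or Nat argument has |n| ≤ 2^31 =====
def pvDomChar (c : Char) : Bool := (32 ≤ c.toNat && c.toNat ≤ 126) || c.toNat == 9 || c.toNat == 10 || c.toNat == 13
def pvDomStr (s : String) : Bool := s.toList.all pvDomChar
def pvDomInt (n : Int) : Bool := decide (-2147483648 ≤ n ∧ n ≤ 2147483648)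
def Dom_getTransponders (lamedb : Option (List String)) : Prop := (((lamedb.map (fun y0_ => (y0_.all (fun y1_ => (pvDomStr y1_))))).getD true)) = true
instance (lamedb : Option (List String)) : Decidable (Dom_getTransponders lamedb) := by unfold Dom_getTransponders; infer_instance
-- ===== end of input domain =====

-- B replaces A's flag-toggling single pass by a truncate/index/filter/slice pipeline (alternative decomposition, same cost).


-- ===== PORT A =====
-- A's for-loop over the lines, carrying (collect, transponders, tp).
-- 'y[0]' is total in Python here: str.split(':') always returns a nonempty list, so headD "" never takes its default.
def aLoop : List String → Bool → List (List (List String)) → List (List String) → List (List (List String))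
  | [], _, acc, _ => acc
  | x :: xs, collect, acc, tp =>
    if x = "transponders\n" then aLoop xs true acc tp
    else if x = "end\n" then acc
    else
      let y := (PySem.Chars.splitOn (PySem.Str.strip x).toList [':']).map (fun cs => String.ofList cs)
      if collect then
        if y.headD "" = "/" then aLoop xs collect (acc ++ [tp]) []
        else aLoop xs collect acc (tp ++ [y])
      else aLoop xs collect acc tp

def getTransponders (lamedb : Option (List String)) : Option (List (List (List String))) :=
  match lamedb with
  | none => none
  | some l => some (aLoop l false [] [])

-- ===== PORT B =====
-- seps = [j for j, y in enumerate(ys) if y[0] == '/']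
def bSeps (ys : List (List String)) : List Int :=
  (PySem.List.enumerate ys).filterMap (fun jy => if jy.2.headD "" = "/" then some jy.1 else none)

def getTransponders_alt (lamedb : Option (List String)) : Option (List (List (List String))) :=
  match lamedb with
  | none => none
  | some l =>
    -- lines = list(takewhile(lambda x: x != 'end\n', lamedb))
    let lines := l.takeWhile (fun x => decide (x ≠ "end\n"))
    -- i = lines.index('transponders\n')  (ValueError → return [])
    match PySem.List.index? lines "transponders\n" with
    | none => some []
    | some i =>
      -- ys = [l.strip().split(':') for l in lines[i+1:] if l != 'transponders\n']
      let ys := ((lines.drop (i + 1)).filter (fun x => decide (x ≠ "transponders\n"))).map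
        (fun x => (PySem.Chars.splitOn (PySem.Str.strip x).toList [':']).map (fun cs => String.ofList cs))
      let seps := bSeps ys
      -- [ys[(seps[k-1]+1 if k > 0 else 0):seps[k]] for k in range(len(seps))]
      some ((PySem.List.pyRange 0 (seps.length : Int) 1).map (fun k =>
        PySem.List.slice ys (some (if 0 < k then PySem.List.pyGetD seps (k - 1) 0 + 1 else 0))
          (some (PySem.List.pyGetD seps k 0))))

-- ===== PRECONDITION & SPEC =====
def Spec_getTransponders (lamedb : Option (List String)) (out : Option (List (List (List String)))) : Prop := out = getTransponders_alt lamedb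
instance (lamedb : Option (List String)) (out : Option (List (List (List String)))) : Decidable (Spec_getTransponders lamedb out) := by unfold Spec_getTransponders; infer_instance

-- ===== CLAIM (what is proved, stated in full; the proofs are below) =====
def Claim_equal_getTransponders : Prop := ∀ (lamedb : Option (List String)), Dom_getTransponders lamedb → Spec_getTransponders lamedb (getTransponders lamedb)

-- ===== LEMMAS AND PROOFS =====

-- the per-line mapping and the separator test, named for the proofs
def fLine (x : String) : List String :=
  (PySem.Chars.splitOn (PySem.Str.strip x).toList [':']).map (fun cs => String.ofList cs)

def isSep (y : List String) : Bool := y.headD "" = "/"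

-- reference partition: A's collect-phase behaviour on the processed lines
def part : List (List String) → List (List String) → List (List (List String))
  | [], _ => []
  | y :: ys, tp => if isSep y then tp :: part ys [] else part ys (tp ++ [y])

-- the processed line stream both sides agree on
def procAll (xs : List String) : List (List String) :=
  ((xs.takeWhile (fun x => decide (x ≠ "end\n"))).filter (fun x => decide (x ≠ "transponders\n"))).map fLine

-- one block of B's slice construction
def blockOf (ys : List (List String)) (k : Int) : List (List String) :=
  PySem.List.slice ys (some (if 0 < k then PySem.List.pyGetD (bSeps ys) (k - 1) 0 + 1 else 0))
    (some (PySem.List.pyGetD (bSeps ys) k 0))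

theorem procAll_nil : procAll [] = [] := rfl

theorem procAll_cons_marker (xs : List String) :
    procAll ("transponders\n" :: xs) = procAll xs := by
  simp [procAll]

theorem procAll_cons_end (xs : List String) : procAll ("end\n" :: xs) = [] := by
  simp [procAll]

theorem procAll_cons (x : String) (xs : List String) (hm : x ≠ "transponders\n")
    (he : x ≠ "end\n") : procAll (x :: xs) = fLine x :: procAll xs := by
  simp [procAll, hm, he]

theorem aLoop_true (xs : List String) : ∀ acc tp,
    aLoop xs true acc tp = acc ++ part (procAll xs) tp := by
  induction xs with
  | nil => intro acc tp; simp [aLoop, procAll_nil, part]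
  | cons x xs ih =>
    intro acc tp
    by_cases hm : x = "transponders\n"
    · subst hm
      simp [aLoop, procAll_cons_marker, ih]
    · by_cases he : x = "end\n"
      · subst he
        simp [aLoop, hm, procAll_cons_end, part]
      · rw [procAll_cons x xs hm he]
        simp [aLoop, hm, he, ih, part, isSep, fLine,
          apply_ite (fun z : List (List (List String)) => acc ++ z)]

theorem aLoop_false (xs : List String) :
    aLoop xs false [] [] =
      match PySem.List.index? (xs.takeWhile (fun x => decide (x ≠ "end\n"))) "transponders\n" with
      | none => []
      | some i => part ((((xs.takeWhile (fun x => decide (x ≠ "end\n"))).drop (i + 1)).filter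
          (fun x => decide (x ≠ "transponders\n"))).map fLine) [] := by
  induction xs with
  | nil => simp [aLoop, PySem.List.index?_eq_idxOf?]
  | cons x xs ih =>
    by_cases hm : x = "transponders\n"
    · subst hm
      have ht : List.takeWhile (fun x => decide (x ≠ "end\n")) ("transponders\n" :: xs)
          = "transponders\n" :: List.takeWhile (fun x => decide (x ≠ "end\n")) xs := by
        simp
      rw [ht, PySem.List.index?_cons_self]
      show aLoop xs true [] [] = _
      rw [aLoop_true]
      simp [procAll]
    · by_cases he : x = "end\n"
      · subst he
        have ht : List.takeWhile (fun x => decide (x ≠ "end\n")) ("end\n" :: xs) = [] := by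
          simp
        rw [ht]
        simp [aLoop, hm, PySem.List.index?_eq_idxOf?]
      · have ht : List.takeWhile (fun x => decide (x ≠ "end\n")) (x :: xs)
            = x :: List.takeWhile (fun x => decide (x ≠ "end\n")) xs := by
          simp [he]
        have hL : aLoop (x :: xs) false [] [] = aLoop xs false [] [] := by
          simp [aLoop, hm, he]
        rw [ht, PySem.List.index?_cons_of_ne _ hm, hL, ih]
        cases h : PySem.List.index? (xs.takeWhile (fun x => decide (x ≠ "end\n"))) "transponders\n" with
        | none => simp
        | some j =>
          simp only [Option.map_some]
          rw [show j + 1 + 1 = j + 2 from rfl]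
          simp [List.drop_succ_cons]

-- bSeps under a shifted enumeration start
theorem enum_fm_shift (ys : List (List String)) : ∀ (s : Int),
    (PySem.List.enumerate ys s).filterMap
        (fun jy => if jy.2.headD "" = "/" then some jy.1 else none)
      = (bSeps ys).map (· + s) := by
  induction ys with
  | nil => intro s; simp [bSeps, PySem.List.enumerate_nil]
  | cons y ys ih =>
    intro s
    simp only [bSeps, PySem.List.enumerate_cons, List.filterMap_cons]
    rw [ih (s + 1)]
    rw [show (0 : Int) + 1 = 1 from rfl, ih 1]
    by_cases hs : y.headD "" = "/"
    · simp only [if_pos hs, List.map_cons, List.map_map, Function.comp_def, zero_add]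
      congr 1
      apply List.map_congr_left
      intro t _; ring
    · simp only [if_neg hs, List.map_map, Function.comp_def]
      apply List.map_congr_left
      intro t _; ring

theorem bSeps_cons (y : List String) (ys : List (List String)) :
    bSeps (y :: ys) = if isSep y then 0 :: (bSeps ys).map (· + 1) else (bSeps ys).map (· + 1) := by
  have h1 := enum_fm_shift ys 1
  rw [show bSeps (y :: ys)
      = (PySem.List.enumerate (y :: ys) 0).filterMap
          (fun jy => if jy.2.headD "" = "/" then some jy.1 else none) from rfl]
  rw [PySem.List.enumerate_cons, List.filterMap_cons, zero_add, h1]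
  by_cases hs : y.head?.getD "" = "/" <;> simp [isSep, hs]

theorem bSeps_nonneg (ys : List (List String)) : ∀ x ∈ bSeps ys, 0 ≤ x := by
  induction ys with
  | nil => intro x hx; simp [bSeps, PySem.List.enumerate_nil] at hx
  | cons y ys ih =>
    intro x hx
    rw [bSeps_cons] at hx
    by_cases hs : isSep y
    · rw [if_pos hs] at hx
      rcases List.mem_cons.1 hx with h | h
      · omega
      · rcases List.mem_map.1 h with ⟨a, ha, rfl⟩
        have := ih a ha; omega
    · rw [if_neg hs] at hx
      rcases List.mem_map.1 hx with ⟨a, ha, rfl⟩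
      have := ih a ha; omega

theorem getD_bSeps_nonneg (ys : List (List String)) (k : Nat) : 0 ≤ (bSeps ys).getD k 0 := by
  rcases Nat.lt_or_ge k (bSeps ys).length with h | h
  · rw [List.getD_eq_getElem _ _ h]
    exact bSeps_nonneg ys _ (List.getElem_mem h)
  · rw [List.getD_eq_default _ _ h]

-- the accumulated prefix only affects the first emitted block
theorem part_acc (ys : List (List String)) : ∀ tp,
    part ys tp = (part ys []).modifyHead (tp ++ ·) := by
  induction ys with
  | nil => intro tp; simp [part]
  | cons y ys ih =>
    intro tp
    by_cases hs : isSep y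
    · simp [part, hs]
    · simp only [part, hs, Bool.false_eq_true, if_false, List.nil_append]
      rw [ih (tp ++ [y]), ih [y], List.modifyHead_modifyHead]
      congr 1
      funext t; simp

theorem slice_shift (y : List String) (ys : List (List String)) (a b : Int)
    (ha : 0 ≤ a) (hb : 0 ≤ b) :
    PySem.List.slice (y :: ys) (some (a + 1)) (some (b + 1)) = PySem.List.slice ys (some a) (some b) := by
  rw [PySem.List.slice_toNat _ (by omega) (by omega), PySem.List.slice_toNat _ ha hb]
  have h1 : (a + 1).toNat = a.toNat + 1 := by omega
  have h2 : (b + 1).toNat = b.toNat + 1 := by omega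
  simp [h1, h2, List.drop_succ_cons, Nat.succ_sub_succ]

theorem blockOf_natCast_zero (ys : List (List String)) :
    blockOf ys ((0 : Nat) : Int) = PySem.List.slice ys (some 0) (some ((bSeps ys).getD 0 0)) := by
  unfold blockOf
  rw [if_neg (by norm_num : ¬ (0 : Int) < ((0 : Nat) : Int)), PySem.List.pyGetD_natCast]

theorem blockOf_natCast_succ (ys : List (List String)) (i : Nat) :
    blockOf ys ((i + 1 : Nat) : Int) =
      PySem.List.slice ys (some ((bSeps ys).getD i 0 + 1)) (some ((bSeps ys).getD (i + 1) 0)) := by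
  unfold blockOf
  have hpos : (0 : Int) < ((i + 1 : Nat) : Int) := by push_cast; omega
  have h1 : ((i + 1 : Nat) : Int) - 1 = ((i : Nat) : Int) := by push_cast; ring
  rw [if_pos hpos, h1, PySem.List.pyGetD_natCast, PySem.List.pyGetD_natCast]

theorem getD_map_add_one (l : List Int) (i : Nat) (h : i < l.length) :
    (l.map (· + 1)).getD i 0 = l.getD i 0 + 1 := by
  rw [List.getD_eq_getElem _ _ (by simpa), List.getElem_map, List.getD_eq_getElem _ _ h]

theorem blockOf_cons_sep (y : List String) (ys : List (List String)) (hs : isSep y = true)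
    (i : Nat) (hi : i < (bSeps ys).length) :
    blockOf (y :: ys) ((i + 1 : Nat) : Int) = blockOf ys (i : Int) := by
  cases i with
  | zero =>
    rw [blockOf_natCast_succ, blockOf_natCast_zero, bSeps_cons, if_pos hs,
      List.getD_cons_zero, List.getD_cons_succ, getD_map_add_one _ _ hi]
    exact slice_shift y ys 0 _ le_rfl (getD_bSeps_nonneg ys 0)
  | succ j =>
    rw [blockOf_natCast_succ, blockOf_natCast_succ, bSeps_cons, if_pos hs,
      List.getD_cons_succ, List.getD_cons_succ,
      getD_map_add_one _ _ (Nat.lt_of_succ_lt hi), getD_map_add_one _ _ hi]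
    exact slice_shift y ys _ _ (by have := getD_bSeps_nonneg ys j; omega)
      (getD_bSeps_nonneg ys (j + 1))

theorem blockOf_cons_nonsep_zero (y : List String) (ys : List (List String)) (hs : isSep y = false)
    (hn : 0 < (bSeps ys).length) :
    blockOf (y :: ys) ((0 : Nat) : Int) = y :: blockOf ys ((0 : Nat) : Int) := by
  rw [blockOf_natCast_zero, blockOf_natCast_zero, bSeps_cons, hs]
  simp only [Bool.false_eq_true, if_false]
  rw [getD_map_add_one _ _ hn]
  rw [PySem.List.slice_toNat _ le_rfl (by have := getD_bSeps_nonneg ys 0; omega),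
    PySem.List.slice_toNat _ le_rfl (getD_bSeps_nonneg ys 0)]
  have h2 : ((bSeps ys).getD 0 0 + 1).toNat = ((bSeps ys).getD 0 0).toNat + 1 := by
    have := getD_bSeps_nonneg ys 0; omega
  simp only [Int.toNat_zero, List.drop_zero, Nat.sub_zero]
  rw [h2, List.take_succ_cons]

theorem blockOf_cons_nonsep_succ (y : List String) (ys : List (List String)) (hs : isSep y = false)
    (i : Nat) (hi : i + 1 < (bSeps ys).length) :
    blockOf (y :: ys) ((i + 1 : Nat) : Int) = blockOf ys ((i + 1 : Nat) : Int) := by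
  rw [blockOf_natCast_succ, blockOf_natCast_succ, bSeps_cons, hs]
  simp only [Bool.false_eq_true, if_false]
  rw [getD_map_add_one _ _ (Nat.lt_of_succ_lt hi), getD_map_add_one _ _ hi]
  exact slice_shift y ys _ _ (by have := getD_bSeps_nonneg ys i; omega)
    (getD_bSeps_nonneg ys (i + 1))

theorem part_eq_range (ys : List (List String)) :
    part ys [] = (List.range (bSeps ys).length).map (fun (i : Nat) => blockOf ys ((i : Nat) : Int)) := by
  induction ys with
  | nil => simp [part, bSeps, PySem.List.enumerate_nil]
  | cons y ys ih =>
    by_cases hs : isSep y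
    · have hp : part (y :: ys) [] = [] :: part ys [] := by simp [part, hs]
      have hl : (bSeps (y :: ys)).length = (bSeps ys).length + 1 := by
        rw [bSeps_cons, if_pos hs]; simp
      rw [hp, ih, hl, List.range_succ_eq_map, List.map_cons, List.map_map]
      congr 1
      · rw [blockOf_natCast_zero, bSeps_cons, if_pos hs, List.getD_cons_zero,
          PySem.List.slice_toNat _ le_rfl le_rfl]
        simp
      · apply List.map_congr_left
        intro i hi
        have hi' : i < (bSeps ys).length := List.mem_range.1 hi
        simp only [Function.comp_def, Nat.succ_eq_add_one]
        exact (blockOf_cons_sep y ys hs i hi').symm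
    · have hsf : isSep y = false := by simpa using hs
      have hp : part (y :: ys) [] = (part ys []).modifyHead ([y] ++ ·) := by
        have h0 : part (y :: ys) [] = part ys [y] := by simp [part, hs]
        rw [h0, part_acc]
      have hl : (bSeps (y :: ys)).length = (bSeps ys).length := by
        rw [bSeps_cons, if_neg hs]; simp
      rw [hp, ih, hl]
      cases hn : (bSeps ys).length with
      | zero => simp
      | succ t =>
        rw [List.range_succ_eq_map, List.map_cons, List.modifyHead_cons,
          List.map_cons, List.map_map, List.map_map]
        congr 1
        · rw [show ([y] ++ blockOf ys ((0 : Nat) : Int)) = y :: blockOf ys ((0 : Nat) : Int) from rfl]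
          exact (blockOf_cons_nonsep_zero y ys hsf (by omega)).symm
        · apply List.map_congr_left
          intro i hi
          have hi' : i < t := List.mem_range.1 hi
          simp only [Function.comp_def, Nat.succ_eq_add_one]
          exact (blockOf_cons_nonsep_succ y ys hsf i (by omega)).symm

theorem part_eq_slices (ys : List (List String)) :
    part ys [] =
      (PySem.List.pyRange 0 ((bSeps ys).length : Int) 1).map (fun k =>
        PySem.List.slice ys (some (if 0 < k then PySem.List.pyGetD (bSeps ys) (k - 1) 0 + 1 else 0))
          (some (PySem.List.pyGetD (bSeps ys) k 0))) := by
  show part ys [] = (PySem.List.pyRange 0 ((bSeps ys).length : Int) 1).map (blockOf ys)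
  rw [PySem.List.pyRange_one,
    show ((bSeps ys).length : Int) - 0 = ((bSeps ys).length : Int) by ring,
    Int.toNat_natCast, List.map_map, part_eq_range]
  apply List.map_congr_left
  intro i _
  simp

-- ===== VERDICT (by name: the statement is the Claim_ definition above) =====
theorem getTransponders_spec : Claim_equal_getTransponders := by
  intro lamedb _
  unfold Spec_getTransponders getTransponders getTransponders_alt
  cases lamedb with
  | none => rfl
  | some l =>
    simp only [aLoop_false l]
    cases h : PySem.List.index? (l.takeWhile (fun x => decide (x ≠ "end\n"))) "transponders\n" with
    | none => rfl
    | some i =>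
      simp only []
      rw [part_eq_slices]
      rfl
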